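-- pv_equiv track=rewrite | github.com/rrzhang139/beta-assembler | code.py | sign_extend_to_16
-- ===== SOURCE A (Python) =====
-- def sign_extend_to_16(value):
--   """
--   Sign extend the given value to 16 bits.
--   """
--   # Convert the value to binary and remove the '0b' prefix
--   binary_repr = bin(value & 0xFFFF)[2:]
--
--   # Ensure the literal does not exceed 16 bits
--   assert len(binary_repr) <= 16, "Literal exceeds 16-bit limit"
--
--   # Identify the bit width by finding the sign change position
--   for i in range(len(binary_repr) - 1, 0, -1):
--       if binary_repr[i] != binary_repr[i-1]:
--           bit_width = i + 1
--           break
--   else: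
--       bit_width = 1  # This is the case when all bits are the same
--
--   # Sign extend the value
--   msb = binary_repr[0]
--   while len(binary_repr) < 16:
--       binary_repr = msb + binary_repr
--
--   return int(binary_repr, 2)
-- ===== SOURCE B (Python) =====
-- def sign_extend_to_16(value):
--     """
--     Sign extend the given value to 16 bits.
--     """
--     n = value & 0xFFFF
--     if n == 0:
--         return 0
--     w = n.bit_length()
--     mask = (0xFFFF >> w) << w  # all bits above position w-1; 0 when w == 16
--     return n | mask
-- ===== Notes on version B (the rewrite author's own statement) =====
-- stated objective: simpler
-- what changed: B replaces A's binary-string construction, dead sign-change scan and character-prepending pad loop with direct integer bit arithmetic: n = value & 0xFFFF, and for nonzero n the high bits above n.bit_length() are set with a single mask (0xFFFF >> w) << w.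
import Mathlib
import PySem

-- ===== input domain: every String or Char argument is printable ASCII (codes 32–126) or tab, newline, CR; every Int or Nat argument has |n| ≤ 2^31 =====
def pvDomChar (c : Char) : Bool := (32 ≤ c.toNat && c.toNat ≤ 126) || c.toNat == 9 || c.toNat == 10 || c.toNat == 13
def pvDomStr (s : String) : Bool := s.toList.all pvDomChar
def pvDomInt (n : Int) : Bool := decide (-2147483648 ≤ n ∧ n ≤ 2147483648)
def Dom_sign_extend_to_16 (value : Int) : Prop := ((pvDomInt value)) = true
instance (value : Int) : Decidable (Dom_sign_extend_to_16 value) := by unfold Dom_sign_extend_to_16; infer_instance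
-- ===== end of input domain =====

-- B replaces A's binary-string construction, dead sign-change scan and character pad loop
-- with direct integer bit arithmetic (bit_length and a mask); equivalence of the two is proved below.

-- ===== PORT A =====
-- A's `while len(binary_repr) < 16: binary_repr = msb + binary_repr`; fuel 16 suffices
-- since the initial list is nonempty and each pass prepends one character.
def pvPadLoop : Nat → Char → List Char → List Char
  | 0, _, l => l
  | f+1, msb, l => if l.length < 16 then pvPadLoop f msb (msb :: l) else l

-- body of A after `value & 0xFFFF` has been computed (n is that masked value, 0 ≤ n < 2^16)
def pvACore (n : Int) : Int :=
  -- binary_repr = bin(n)[2:]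
  let binary_repr : List Char :=
    PySem.List.slice (PySem.Int.toBinChars0b n) (some 2) none
  -- `assert len(binary_repr) <= 16` always holds (n < 2^16), so the assert never raises.
  -- the for/else loop computing bit_width (dead code in A: bit_width is never used)
  let _bit_width : Int :=
    match (PySem.List.pyRange ((binary_repr.length : Int) - 1) 0 (-1)).find?
        (fun i => PySem.List.pyGetD binary_repr i ' ' != PySem.List.pyGetD binary_repr (i-1) ' ') with
    | some i => i + 1
    | none => 1
  -- msb = binary_repr[0]; binary_repr is never empty, so the default is unreachable
  let msb := PySem.List.pyGetD binary_repr 0 '0'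
  let padded := pvPadLoop 16 msb binary_repr
  -- int(padded, 2), ported by hand as the base-2 digit fold; exact here because padded is a
  -- nonempty list of '0'/'1' characters only (no sign/whitespace/underscore/prefix cases arise)
  padded.foldl (fun acc c => 2 * acc + (if c = '1' then 1 else 0)) (0 : Int)

def sign_extend_to_16 (value : Int) : Int := pvACore (PySem.Int.band value 0xFFFF)

-- ===== PORT B =====
-- body of B after `n = value & 0xFFFF`
def pvBCore (n : Int) : Int :=
  if n = 0 then 0
  else
    let w := PySem.Int.bitLength n
    let mask : Int := (0xFFFF >>> w) <<< w
    PySem.Int.bor n mask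

def sign_extend_to_16_alt (value : Int) : Int := pvBCore (PySem.Int.band value 0xFFFF)

-- ===== PRECONDITION & SPEC =====
def Spec_sign_extend_to_16 (value : Int) (out : Int) : Prop := out = sign_extend_to_16_alt value
instance (value : Int) (out : Int) : Decidable (Spec_sign_extend_to_16 value out) := by unfold Spec_sign_extend_to_16; infer_instance

-- ===== CLAIM (what is proved, stated in full; the proofs are below) =====
def Claim_equal_sign_extend_to_16 : Prop := ∀ (value : Int), Dom_sign_extend_to_16 value → Spec_sign_extend_to_16 value (sign_extend_to_16 value)

-- ===== LEMMAS AND PROOFS =====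

-- the digit list Nat.toDigits 2 produces, as a structural recursion (proof-side mirror)
def pvDigits (n : Nat) : List Char :=
  if n < 2 then [Nat.digitChar n]
  else pvDigits (n / 2) ++ [Nat.digitChar (n % 2)]
  decreasing_by omega

-- the digit-accumulating fold of port A, named for the lemmas
def pvStep (acc : Int) (c : Char) : Int := 2 * acc + (if c = '1' then 1 else 0)

theorem pvToDigitsCore_eq (f : Nat) : ∀ (n : Nat) (l : List Char), n < f →
    Nat.toDigitsCore 2 f n l = pvDigits n ++ l := by
  induction f with
  | zero => intro n l h; omega
  | succ f ih =>
    intro n l h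
    rw [Nat.toDigitsCore]
    by_cases h2 : n < 2
    · have : n / 2 = 0 := by omega
      simp [this]
      rw [pvDigits]
      simp [h2]
      congr 1
      omega
    · have hne : ¬ (n / 2 = 0) := by omega
      simp [hne]
      rw [ih (n / 2) _ (by omega)]
      conv_rhs => rw [pvDigits]
      simp [h2]

theorem pvToDigits_eq (n : Nat) : Nat.toDigits 2 n = pvDigits n := by
  rw [Nat.toDigits]
  rw [pvToDigitsCore_eq (n+1) n [] (by omega)]
  simp

theorem pvDigits_head (n : Nat) (h : 1 ≤ n) : ∃ t, pvDigits n = '1' :: t := by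
  induction n using Nat.strong_induction_on with
  | _ n ih =>
    rw [pvDigits]
    by_cases h2 : n < 2
    · have : n = 1 := by omega
      subst this
      exact ⟨[], rfl⟩
    · simp only [if_neg h2]
      obtain ⟨t, ht⟩ := ih (n / 2) (by omega) (by omega)
      exact ⟨t ++ [Nat.digitChar (n % 2)], by rw [ht]; simp⟩

theorem pvFoldl_shift (l : List Char) : ∀ a : Int,
    l.foldl pvStep a = a * 2 ^ l.length + l.foldl pvStep 0 := by
  induction l with
  | nil => intro a; simp
  | cons c t ih =>
    intro a
    simp only [List.foldl_cons, List.length_cons]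
    rw [ih (pvStep a c), ih (pvStep 0 c)]
    unfold pvStep
    ring

theorem pvFoldl_digits (n : Nat) : (pvDigits n).foldl pvStep 0 = (n : Int) := by
  induction n using Nat.strong_induction_on with
  | _ n ih =>
    rw [pvDigits]
    by_cases h2 : n < 2
    · interval_cases n <;> simp [pvStep] <;> decide
    · simp only [if_neg h2, List.foldl_append, List.foldl_cons, List.foldl_nil]
      rw [ih (n / 2) (by omega)]
      rcases Nat.mod_two_eq_zero_or_one n with hm | hm <;>
        simp [hm, pvStep, Nat.digitChar] <;> omega

theorem pvDigits_length (n : Nat) (h : 1 ≤ n) :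
    (pvDigits n).length = PySem.Int.bitLength (n : Int) := by
  induction n using Nat.strong_induction_on with
  | _ n ih =>
    rw [pvDigits]
    by_cases h2 : n < 2
    · have : n = 1 := by omega
      subst this
      simp
      decide
    · simp only [if_neg h2, List.length_append, List.length_cons, List.length_nil]
      rw [ih (n / 2) (by omega) (by omega)]
      rw [PySem.Int.bitLength_natCast (show 0 < n by omega)]

theorem pvFoldl_replicate (k : Nat) : ∀ a : Int,
    (List.replicate k '1').foldl pvStep a = a * 2 ^ k + 2 ^ k - 1 := by
  induction k with
  | zero => intro a; simp
  | succ k ih =>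
    intro a
    rw [List.replicate_succ, List.foldl_cons, ih]
    unfold pvStep
    simp
    ring

theorem pvPadLoop_eq (f : Nat) : ∀ (c : Char) (l : List Char),
    pvPadLoop f c l = List.replicate (min f (16 - l.length)) c ++ l := by
  induction f with
  | zero => intro c l; simp [pvPadLoop]
  | succ f ih =>
    intro c l
    rw [pvPadLoop]
    by_cases h : l.length < 16
    · rw [if_pos h, ih]
      have h1 : min f (16 - (c :: l).length) = min f (15 - l.length) := by
        simp only [List.length_cons]; omega
      have h2 : min (f + 1) (16 - l.length) = min f (15 - l.length) + 1 := by omega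
      rw [h1, h2, List.replicate_succ']
      simp
    · rw [if_neg h]
      have : min (f + 1) (16 - l.length) = 0 := by omega
      simp [this]

theorem pvBand_bounds (v : Int) : 0 ≤ PySem.Int.band v 65535 ∧ PySem.Int.band v 65535 < 65536 := by
  unfold PySem.Int.band
  by_cases h : 0 ≤ v
  · simp [h]
    rw [Nat.and_two_pow_sub_one_eq_mod v.toNat 16]
    have := Nat.mod_lt v.toNat (show 0 < 2 ^ 16 by norm_num)
    omega
  · simp [h]
    have hle : 65535 &&& ((-v).toNat - 1) ≤ 65535 := Nat.and_le_left
    omega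

theorem pvMaskN (w : Nat) (h16 : w ≤ 16) :
    (65535 >>> w) <<< w = 2 ^ 16 - 2 ^ w := by
  have hq : 2 ^ (16 - w) * 2 ^ w = 2 ^ 16 := by
    rw [← pow_add]; congr 1; omega
  have hp1 : 1 ≤ 2 ^ w := Nat.one_le_two_pow
  have hq1 : 1 ≤ 2 ^ (16 - w) := Nat.one_le_two_pow
  have hdiv : 65535 / 2 ^ w = 2 ^ (16 - w) - 1 := by
    apply Nat.div_eq_of_lt_le
    · calc (2 ^ (16 - w) - 1) * 2 ^ w = 2 ^ 16 - 2 ^ w := by rw [Nat.sub_mul, hq]; omega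
      _ ≤ 65535 := by omega
    · have : (2 ^ (16 - w) - 1 + 1) * 2 ^ w = 2 ^ 16 := by rw [Nat.sub_add_cancel hq1, hq]
      omega
  rw [Nat.shiftRight_eq_div_pow, hdiv, Nat.shiftLeft_eq, Nat.sub_mul, hq]
  omega

theorem pvSlice_bin (m : Nat) :
    PySem.List.slice (PySem.Int.toBinChars0b (m : Int)) (some 2) none = pvDigits m := by
  unfold PySem.Int.toBinChars0b
  rw [if_neg (by omega : ¬ ((m : Int) < 0))]
  rw [Int.toNat_natCast, pvToDigits_eq]
  rw [show ((2:Int)) = ((2:Nat):Int) from rfl, PySem.List.slice_from_natCast]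
  rfl

theorem pvACore_val (m : Nat) (h1 : 1 ≤ m) (h16 : (pvDigits m).length ≤ 16) :
    pvACore (m : Int) = (2 ^ (16 - (pvDigits m).length) - 1) * 2 ^ (pvDigits m).length + m := by
  obtain ⟨t, ht⟩ := pvDigits_head m h1
  have hmsb : PySem.List.pyGetD (pvDigits m) 0 '0' = '1' := by
    rw [ht]; simp [pysem]
  simp only [pvACore, pvSlice_bin, hmsb]
  rw [pvPadLoop_eq]
  have hmin : min 16 (16 - (pvDigits m).length) = 16 - (pvDigits m).length := by omega
  rw [hmin]
  have hstep : (fun (acc : Int) (c : Char) => 2 * acc + (if c = '1' then 1 else 0)) = pvStep := rfl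
  rw [hstep, List.foldl_append, pvFoldl_replicate, pvFoldl_shift, pvFoldl_digits]
  simp

theorem pvBCore_val (m : Nat) (h1 : 1 ≤ m) (hm : m < 65536) :
    pvBCore (m : Int) =
      ((2 ^ 16 - 2 ^ PySem.Int.bitLength (m : Int) + m : Nat) : Int) := by
  have hz : ((m : Int)) ≠ 0 := by omega
  have hlt : m < 2 ^ PySem.Int.bitLength (m : Int) := by
    have := PySem.Int.lt_two_pow_bitLength (m : Int)
    simpa using this
  have hw1 : 1 ≤ PySem.Int.bitLength (m : Int) := by
    by_contra hc
    have : PySem.Int.bitLength (m : Int) = 0 := by omega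
    rw [this] at hlt
    omega
  have hw16 : PySem.Int.bitLength (m : Int) ≤ 16 := by
    have hle := PySem.Int.two_pow_bitLength_le (m : Int) (by simpa using hz)
    simp only [Int.natAbs_natCast] at hle
    by_contra hc
    have : 2 ^ 16 ≤ 2 ^ (PySem.Int.bitLength (m : Int) - 1) :=
      Nat.pow_le_pow_right (by omega) (by omega)
    omega
  set w := PySem.Int.bitLength (m : Int) with hw
  simp only [pvBCore, if_neg hz]
  rw [← hw]
  rw [PySem.Int.bor_natCast, pvMaskN w hw16]
  congr 1
  rw [show 2 ^ 16 - 2 ^ w = (2 ^ (16 - w) - 1) <<< w by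
        rw [Nat.shiftLeft_eq, Nat.sub_mul, one_mul, ← pow_add,
          show 16 - w + w = 16 from by omega]]
  rw [Nat.lor_comm, ← Nat.shiftLeft_add_eq_or_of_lt hlt]

theorem pvCore_eq (n : Int) (h0 : 0 ≤ n) (h : n < 65536) : pvACore n = pvBCore n := by
  by_cases hz : n = 0
  · subst hz; decide
  · obtain ⟨m, rfl⟩ : ∃ m : Nat, n = (m : Int) := ⟨n.toNat, (Int.toNat_of_nonneg h0).symm⟩
    have h1 : 1 ≤ m := by omega
    have hm : m < 65536 := by exact_mod_cast h
    have hL := pvDigits_length m h1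
    have hlt : m < 2 ^ PySem.Int.bitLength (m : Int) := by
      have := PySem.Int.lt_two_pow_bitLength (m : Int)
      simpa using this
    have hw16 : PySem.Int.bitLength (m : Int) ≤ 16 := by
      have hle := PySem.Int.two_pow_bitLength_le (m : Int) (by simp; omega)
      simp only [Int.natAbs_natCast] at hle
      by_contra hc
      have : 2 ^ 16 ≤ 2 ^ (PySem.Int.bitLength (m : Int) - 1) :=
        Nat.pow_le_pow_right (by omega) (by omega)
      omega
    rw [pvACore_val m h1 (by omega), pvBCore_val m h1 hm, hL]
    set w := PySem.Int.bitLength (m : Int) with hwdef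
    have hq : 2 ^ (16 - w) * 2 ^ w = 2 ^ 16 := by rw [← pow_add]; congr 1; omega
    have hq1 : 1 ≤ 2 ^ (16 - w) := Nat.one_le_two_pow
    have hcast : ((2:Int) ^ (16 - w) - 1) * 2 ^ w + m =
        (((2 ^ (16 - w) - 1) * 2 ^ w + m : Nat) : Int) := by
      push_cast [Nat.cast_sub hq1]
      ring
    rw [hcast]
    congr 1
    rw [Nat.sub_mul, hq]
    omega

-- ===== VERDICT (by name: the statement is the Claim_ definition above) =====
theorem sign_extend_to_16_spec : Claim_equal_sign_extend_to_16 := by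
  intro v _
  unfold Spec_sign_extend_to_16 sign_extend_to_16 sign_extend_to_16_alt
  have h := pvBand_bounds v
  have hx : (0xFFFF : Int) = 65535 := by norm_num
  rw [hx]
  exact pvCore_eq _ h.1 h.2
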